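-- pv_equiv track=rewrite | github.com/Akunor/freecodecamp | daily-challenges/2026.01.21 Challenge.py | parse_inline_code
-- ===== SOURCE A (Python) =====
-- def parse_inline_code(markdown):
--     open = False
--     html = ''
--     for char in markdown:
--         if char == '`' and not(open):
--             html += '<code>'
--             open = True
--         elif char == '`' and open:
--             html += '</code>'
--             open = False
--         else:
--             html += char
--
--     return html
-- ===== SOURCE B (Python) =====
-- def parse_inline_code(markdown):
--     parts = markdown.split('`')
--     html = parts[0]
--     for i, seg in enumerate(parts[1:]):
--         html += ('<code>' if i % 2 == 0 else '</code>') + seg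
--     return html
-- ===== Notes on version B (the rewrite author's own statement) =====
-- stated objective: idiomatic
-- what changed: Replaces the per-character state-machine (open flag toggled on every backtick) by split('`') plus alternating <code>/</code> tags chosen by segment-index parity.
import Mathlib
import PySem

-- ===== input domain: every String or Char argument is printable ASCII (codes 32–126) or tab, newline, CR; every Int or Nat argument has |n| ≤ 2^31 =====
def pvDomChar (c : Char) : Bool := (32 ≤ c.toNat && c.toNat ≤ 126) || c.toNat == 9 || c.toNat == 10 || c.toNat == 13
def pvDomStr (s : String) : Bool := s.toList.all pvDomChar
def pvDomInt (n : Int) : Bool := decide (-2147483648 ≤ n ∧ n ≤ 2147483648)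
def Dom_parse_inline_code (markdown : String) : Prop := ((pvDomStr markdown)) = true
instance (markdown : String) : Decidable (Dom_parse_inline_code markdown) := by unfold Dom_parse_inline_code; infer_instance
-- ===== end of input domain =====

-- B replaces A's per-character open-flag state machine by split('`') + alternating tags by index parity (idiomatic decomposition, same cost).

-- ===== PORT A =====
-- A's loop body: state (open, html); branches in A's order.
def stepA (st : Bool × List Char) (c : Char) : Bool × List Char :=
  if c == '`' && !st.1 then (true, st.2 ++ "<code>".toList)
  else if c == '`' && st.1 then (false, st.2 ++ "</code>".toList)
  else (st.1, st.2 ++ [c])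

def parse_inline_code (markdown : String) : String :=
  String.mk (markdown.toList.foldl stepA (false, [])).2

-- ===== PORT B =====
-- Hand port of Python's str.split for a single-character separator (exact: the empty string splits
-- to one empty piece, consecutive separators give empty pieces, a trailing separator a trailing empty piece).
def pySplit1 (sep : Char) : List Char → List (List Char)
  | [] => [[]]
  | c :: cs =>
    if c == sep then [] :: pySplit1 sep cs
    else
      match pySplit1 sep cs with
      | [] => [[c]]            -- unreachable: pySplit1 never returns []
      | q :: qs => (c :: q) :: qs

-- B's loop body: html += ('<code>' if i % 2 == 0 else '</code>') + seg
def stepB (acc : List Char) (iseg : Int × List Char) : List Char :=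
  acc ++ (if PySem.Int.mod iseg.1 2 == 0 then "<code>".toList else "</code>".toList) ++ iseg.2

def parse_inline_code_alt (markdown : String) : String :=
  match pySplit1 '`' markdown.toList with
  | [] => ""                   -- unreachable: split never yields []
  | p :: rest => String.mk ((PySem.List.enumerate rest 0).foldl stepB p)

-- ===== PRECONDITION & SPEC =====
def Spec_parse_inline_code (markdown : String) (out : String) : Prop := out = parse_inline_code_alt markdown
instance (markdown : String) (out : String) : Decidable (Spec_parse_inline_code markdown out) := by unfold Spec_parse_inline_code; infer_instance

-- ===== CLAIM (what is proved, stated in full; the proofs are below) =====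
def Claim_equal_parse_inline_code : Prop := ∀ (markdown : String), Dom_parse_inline_code markdown → Spec_parse_inline_code markdown (parse_inline_code markdown)

-- ===== LEMMAS AND PROOFS =====

-- the translated text A produces from the rest of the input, given the current open flag
def fA (opn : Bool) : List Char → List Char
  | [] => []
  | c :: cs =>
    if c == '`' then (if opn then "</code>".toList else "<code>".toList) ++ fA (!opn) cs
    else c :: fA opn cs

-- the tagged concatenation of the segments after the first, given the open flag at their front
def tags (opn : Bool) : List (List Char) → List Char
  | [] => []
  | q :: qs => (if opn then "</code>".toList else "<code>".toList) ++ q ++ tags (!opn) qs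

theorem foldA_eq (cs : List Char) : ∀ (opn : Bool) (acc : List Char),
    (cs.foldl stepA (opn, acc)).2 = acc ++ fA opn cs := by
  induction cs with
  | nil => intro opn acc; simp [fA]
  | cons c cs ih =>
    intro opn acc
    by_cases h : c = '`'
    · cases opn <;> simp [stepA, fA, h, ih]
    · simp [stepA, fA, h, ih]

theorem pySplit1_ne_nil (sep : Char) (cs : List Char) : pySplit1 sep cs ≠ [] := by
  cases cs with
  | nil => simp [pySplit1]
  | cons c cs =>
    simp only [pySplit1]
    split
    · simp
    · split <;> simp

theorem fA_eq_tags (cs : List Char) : ∀ (opn : Bool) (p : List Char) (rest : List (List Char)),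
    pySplit1 '`' cs = p :: rest → fA opn cs = p ++ tags opn rest := by
  induction cs with
  | nil =>
    intro opn p rest h
    simp [pySplit1] at h
    simp [h.1, h.2, tags, fA]
  | cons c cs ih =>
    intro opn p rest h
    by_cases hc : c = '`'
    · simp [pySplit1, hc] at h
      obtain ⟨q, qs, hsplit⟩ : ∃ q qs, pySplit1 '`' cs = q :: qs := by
        cases hq : pySplit1 '`' cs with
        | nil => exact absurd hq (pySplit1_ne_nil _ _)
        | cons q qs => exact ⟨q, qs, rfl⟩
      rw [hsplit] at h
      simp [fA, hc, ← h.1, ih (!opn) q qs hsplit, ← h.2, tags]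
    · obtain ⟨q, qs, hsplit⟩ : ∃ q qs, pySplit1 '`' cs = q :: qs := by
        cases hq : pySplit1 '`' cs with
        | nil => exact absurd hq (pySplit1_ne_nil _ _)
        | cons q qs => exact ⟨q, qs, rfl⟩
      simp [pySplit1, hc, hsplit] at h
      rw [fA, if_neg (by simp [hc]), ih opn q qs hsplit, ← h.1, ← h.2]
      simp
  
theorem fmod_two_eq_emod (s : Int) : s.fmod 2 = s % 2 := by
  rw [Int.fmod_eq_emod]; simp

theorem parity_flip (s : Int) :
    ((PySem.Int.mod (s + 1) 2 == 0) : Bool) = !(PySem.Int.mod s 2 == 0) := by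
  simp only [PySem.Int.mod, fmod_two_eq_emod]
  rcases Int.emod_two_eq_zero_or_one s with h | h
  · have h2 : (s + 1) % 2 = 1 := by omega
    rw [h, h2]; rfl
  · have h2 : (s + 1) % 2 = 0 := by omega
    rw [h, h2]; rfl

theorem foldB_eq (rest : List (List Char)) : ∀ (s : Int) (acc : List Char),
    (PySem.List.enumerate rest s).foldl stepB acc = acc ++ tags (!(PySem.Int.mod s 2 == 0)) rest := by
  induction rest with
  | nil => intro s acc; simp [PySem.List.enumerate_nil, tags]
  | cons q qs ih =>
    intro s acc
    rw [PySem.List.enumerate_cons, List.foldl_cons, ih (s + 1), tags, parity_flip s]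
    cases h : (PySem.Int.mod s 2 == 0 : Bool)
    · have h' : ¬ (2 ∣ s) := by
        simp only [PySem.Int.mod, fmod_two_eq_emod] at h
        rw [Int.dvd_iff_emod_eq_zero]
        simp at h
        omega
      simp [stepB, h']
    · have h' : 2 ∣ s := by
        simp only [PySem.Int.mod, fmod_two_eq_emod] at h
        rw [Int.dvd_iff_emod_eq_zero]
        simpa using h
      simp [stepB, h']

-- ===== VERDICT (by name: the statement is the Claim_ definition above) =====
theorem parse_inline_code_spec : Claim_equal_parse_inline_code := by
  intro markdown _
  unfold Spec_parse_inline_code parse_inline_code parse_inline_code_alt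
  obtain ⟨p, rest, hsplit⟩ : ∃ p rest, pySplit1 '`' markdown.toList = p :: rest := by
    cases hq : pySplit1 '`' markdown.toList with
    | nil => exact absurd hq (pySplit1_ne_nil _ _)
    | cons q qs => exact ⟨q, qs, rfl⟩
  rw [hsplit, foldA_eq, fA_eq_tags markdown.toList false p rest hsplit]
  simp [foldB_eq, PySem.Int.mod, Int.fmod_eq_emod]
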